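-- pv_equiv track=rewrite | github.com/leoDira23/F2ML | Painel administrativo/backend/meu_projeto/validations/validators.py | nome_completo_valido
-- ===== SOURCE A (Python) =====
-- def nome_completo_valido(nome):
--     """
--     Valida nome completo:
--     - Obrigatório
--     - Pelo menos dois nomes
--     - Apenas letras e espaços
--     """
--     if not nome:
--         return False
--
--     nome = nome.strip()
--
--     # Deve conter pelo menos nome e sobrenome
--     if len(nome.split()) < 2:
--         return False
--
--     # Verifica se contém apenas letras e espaços
--     for c in nome:
--         if not (c.isalpha() or c.isspace()):
--             return False
--
--     return True
-- ===== SOURCE B (Python) =====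
-- def nome_completo_valido(nome):
--     words = nome.split()
--     return len(words) >= 2 and all(w.isalpha() for w in words)
-- ===== Notes on version B (the rewrite author's own statement) =====
-- stated objective: simpler
-- what changed: B drops the emptiness guard, the strip and the per-character alpha-or-space scan: it splits once into words and checks there are at least two words, all alphabetic, via str.isalpha on each word.
import Mathlib
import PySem

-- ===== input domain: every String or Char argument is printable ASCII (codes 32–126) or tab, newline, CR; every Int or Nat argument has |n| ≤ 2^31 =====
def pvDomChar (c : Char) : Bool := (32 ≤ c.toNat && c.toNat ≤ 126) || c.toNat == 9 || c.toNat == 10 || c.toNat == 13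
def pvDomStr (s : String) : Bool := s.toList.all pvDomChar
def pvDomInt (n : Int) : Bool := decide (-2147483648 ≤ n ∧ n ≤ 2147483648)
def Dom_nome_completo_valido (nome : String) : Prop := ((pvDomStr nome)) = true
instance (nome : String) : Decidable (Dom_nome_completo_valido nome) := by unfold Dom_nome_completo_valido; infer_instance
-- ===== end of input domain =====

-- B replaces A's strip + word-count + per-character alpha-or-space scan by a single split
-- into words followed by a two-words-minimum check and per-word isalpha (objective: simpler).


-- ===== PORT A =====
def nome_completo_valido (nome : String) : Bool :=
  if nome == "" then false
  else
    let nome := PySem.Str.strip nome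
    if (PySem.Str.split₀ nome).length < 2 then false
    else
      -- the early-return char loop: false as soon as a char is neither alpha nor space
      nome.toList.all (fun c => PySem.Chars.isalpha c || PySem.Chars.isspace c)

-- ===== PORT B =====
def nome_completo_valido_alt (nome : String) : Bool :=
  let words := PySem.Str.split₀ nome
  decide (2 ≤ words.length) && words.all (fun w => PySem.Str.strIsalpha w)

-- ===== PRECONDITION & SPEC =====
def Spec_nome_completo_valido (nome : String) (out : Bool) : Prop := out = nome_completo_valido_alt nome
instance (nome : String) (out : Bool) : Decidable (Spec_nome_completo_valido nome out) := by unfold Spec_nome_completo_valido; infer_instance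

-- ===== CLAIM (what is proved, stated in full; the proofs are below) =====
def Claim_equal_nome_completo_valido : Prop := ∀ (nome : String), Dom_nome_completo_valido nome → Spec_nome_completo_valido nome (nome_completo_valido nome)

-- ===== LEMMAS AND PROOFS =====

-- a simple accumulator-free spine of PySem.Chars.split₀.go
def pvWds : List Char → List Char → List (List Char)
  | [], cur => if cur.isEmpty then [] else [cur.reverse]
  | c :: rest, cur =>
      if PySem.Chars.isspace c then
        if cur.isEmpty then pvWds rest [] else cur.reverse :: pvWds rest []
      else pvWds rest (c :: cur)

theorem pvGo_eq_wds (cs : List Char) : ∀ cur acc,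
    PySem.Chars.split₀.go cs cur acc = acc.reverse ++ pvWds cs cur := by
  induction cs with
  | nil =>
      intro cur acc
      by_cases h : cur.isEmpty <;>
        simp [PySem.Chars.split₀.go, pvWds, h]
  | cons c rest ih =>
      intro cur acc
      by_cases hs : PySem.Chars.isspace c
      · by_cases h : cur.isEmpty <;>
          simp [PySem.Chars.split₀.go, pvWds, hs, h, ih]
      · simp [PySem.Chars.split₀.go, pvWds, hs, ih]

theorem pvSplit₀_eq_wds (cs : List Char) : PySem.Chars.split₀ cs = pvWds cs [] := by
  simp [PySem.Chars.split₀, pvGo_eq_wds]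

-- splitting ignores leading whitespace
theorem pvWds_lstrip (cs : List Char) :
    pvWds (List.dropWhile PySem.Chars.isspace cs) [] = pvWds cs [] := by
  induction cs with
  | nil => rfl
  | cons c rest ih =>
      by_cases hs : PySem.Chars.isspace c <;>
        simp [List.dropWhile, pvWds, hs, ih]

-- an all-whitespace suffix contributes nothing but flushing the pending word
theorem pvWds_all_space (t : List Char) (ht : ∀ c ∈ t, PySem.Chars.isspace c = true) :
    ∀ cur, pvWds t cur = if cur.isEmpty then [] else [cur.reverse] := by
  induction t with
  | nil => intro cur; rfl
  | cons c rest ih =>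
      intro cur
      have hc : PySem.Chars.isspace c = true := ht c (by simp)
      have ih' := ih (fun d hd => ht d (by simp [hd]))
      by_cases h : cur.isEmpty <;> simp [pvWds, hc, h, ih']

-- splitting ignores trailing whitespace
theorem pvWds_append_space (cs : List Char) (t : List Char)
    (ht : ∀ c ∈ t, PySem.Chars.isspace c = true) :
    ∀ cur, pvWds (cs ++ t) cur = pvWds cs cur := by
  induction cs with
  | nil =>
      intro cur
      simpa [pvWds] using pvWds_all_space t ht cur
  | cons c rest ih =>
      intro cur
      by_cases hs : PySem.Chars.isspace c <;>
        by_cases h : cur.isEmpty <;>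
          simp [pvWds, hs, h, ih]

theorem pvWds_strip (cs : List Char) :
    pvWds (PySem.Chars.strip cs) [] = pvWds cs [] := by
  unfold PySem.Chars.strip PySem.Chars.rstrip PySem.Chars.lstrip
  set l := List.dropWhile PySem.Chars.isspace cs with hl
  have hsplit : (List.dropWhile PySem.Chars.isspace l.reverse).reverse ++
      (List.takeWhile PySem.Chars.isspace l.reverse).reverse = l := by
    rw [← List.reverse_append, List.takeWhile_append_dropWhile, List.reverse_reverse]
  have ht : ∀ c ∈ (List.takeWhile PySem.Chars.isspace l.reverse).reverse,
      PySem.Chars.isspace c = true := by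
    intro c hc
    exact List.mem_takeWhile_imp (List.mem_reverse.mp hc)
  calc pvWds (List.dropWhile PySem.Chars.isspace l.reverse).reverse []
      = pvWds ((List.dropWhile PySem.Chars.isspace l.reverse).reverse ++
          (List.takeWhile PySem.Chars.isspace l.reverse).reverse) [] :=
        (pvWds_append_space _ _ ht []).symm
    _ = pvWds l [] := by rw [hsplit]
    _ = pvWds cs [] := pvWds_lstrip cs

theorem pvStrIsalpha_snoc (l : List Char) (d : Char) :
    PySem.Chars.strIsalpha (l.reverse ++ [d]) =
      (PySem.Chars.isalpha d && l.all PySem.Chars.isalpha) := by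
  simp [PySem.Chars.strIsalpha, Bool.and_comm]

-- every word of the split is alphabetic iff every char is alpha-or-space
theorem pvWds_all_alpha (cs : List Char) : ∀ cur,
    (pvWds cs cur).all (fun w => PySem.Chars.strIsalpha w) =
      (cs.all (fun c => PySem.Chars.isalpha c || PySem.Chars.isspace c) &&
        cur.all PySem.Chars.isalpha) := by
  induction cs with
  | nil =>
      intro cur
      cases cur <;>
        simp [pvWds, pvStrIsalpha_snoc, Bool.and_comm]
  | cons c rest ih =>
      intro cur
      by_cases hs : PySem.Chars.isspace c
      · cases cur with
        | nil => simp [pvWds, hs, ih]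
        | cons d cur' =>
            simp [pvWds, hs, ih, pvStrIsalpha_snoc, Bool.and_comm,
              Bool.and_assoc]
      · simp [pvWds, hs, ih, Bool.and_comm, Bool.and_assoc]

theorem pvLen_split₀ (s : String) :
    (PySem.Str.split₀ s).length = (pvWds s.toList []).length := by
  rw [← pvSplit₀_eq_wds, ← PySem.Str.split₀_map_toList, List.length_map]

theorem pvAll_split₀ (s : String) :
    (PySem.Str.split₀ s).all (fun w => PySem.Str.strIsalpha w) =
      (pvWds s.toList []).all (fun w => PySem.Chars.strIsalpha w) := by
  rw [← pvSplit₀_eq_wds, ← PySem.Str.split₀_map_toList, List.all_map]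
  simp only [PySem.Str.strIsalpha_eq, Function.comp_def]

theorem pvMain (nome : String) :
    nome_completo_valido nome = nome_completo_valido_alt nome := by
  unfold nome_completo_valido nome_completo_valido_alt
  by_cases he : nome = ""
  · subst he
    have h := pvLen_split₀ ""
    simp [pvWds] at h
    simp [h]
  · have hne : (nome == "") = false := by simp [he]
    rw [hne]
    simp only [Bool.false_eq_true, if_false]
    have hch : (PySem.Str.strip nome).toList.all
        (fun c => PySem.Chars.isalpha c || PySem.Chars.isspace c) =
        (pvWds nome.toList []).all (fun w => PySem.Chars.strIsalpha w) := by
      rw [PySem.Str.toList_strip, ← pvWds_strip nome.toList]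
      simpa using (pvWds_all_alpha (PySem.Chars.strip nome.toList) []).symm
    have hl : (PySem.Str.split₀ (PySem.Str.strip nome)).length =
        (pvWds nome.toList []).length := by
      rw [pvLen_split₀, PySem.Str.toList_strip, pvWds_strip]
    rw [hl, hch, pvLen_split₀, pvAll_split₀]
    by_cases hlt : (pvWds nome.toList []).length < 2
    · simp [hlt, Nat.not_le.mpr hlt]
    · simp [hlt, Nat.not_lt.mp hlt]

-- ===== VERDICT (by name: the statement is the Claim_ definition above) =====
theorem nome_completo_valido_spec : Claim_equal_nome_completo_valido := by
  intro nome _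
  unfold Spec_nome_completo_valido
  exact pvMain nome
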